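-- pv_equiv track=rewrite | github.com/SozBroz/PPO_v_AW | scripts/fleet_orchestrator.py | _cmdline_machine_id_match
-- ===== SOURCE A (Python) =====
-- def _cmdline_machine_id_match(cmdline: list[str], machine_id: str) -> bool:
--     flat = " ".join(cmdline)
--     if f"--machine-id {machine_id}" in flat or f"--machine-id={machine_id}" in flat:
--         return True
--     i = 0
--     while i < len(cmdline):
--         if cmdline[i] == "--machine-id" and i + 1 < len(cmdline):
--             return cmdline[i + 1] == machine_id
--         if cmdline[i].startswith("--machine-id="):
--             return cmdline[i].split("=", 1)[-1] == machine_id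
--         i += 1
--     return False
-- ===== SOURCE B (Python) =====
-- def _cmdline_machine_id_match(cmdline: list[str], machine_id: str) -> bool:
--     flat = " ".join(cmdline)
--     return f"--machine-id {machine_id}" in flat or f"--machine-id={machine_id}" in flat
-- ===== Notes on version B (the rewrite author's own statement) =====
-- stated objective: simpler
-- what changed: B drops A's entire manual while-loop token scan and returns just the two substring tests on the joined string; the token scan is dead code for a True result because any token-level match already makes one of the substring tests succeed, and where it returns False early the substring tests have failed too.
import Mathlib
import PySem

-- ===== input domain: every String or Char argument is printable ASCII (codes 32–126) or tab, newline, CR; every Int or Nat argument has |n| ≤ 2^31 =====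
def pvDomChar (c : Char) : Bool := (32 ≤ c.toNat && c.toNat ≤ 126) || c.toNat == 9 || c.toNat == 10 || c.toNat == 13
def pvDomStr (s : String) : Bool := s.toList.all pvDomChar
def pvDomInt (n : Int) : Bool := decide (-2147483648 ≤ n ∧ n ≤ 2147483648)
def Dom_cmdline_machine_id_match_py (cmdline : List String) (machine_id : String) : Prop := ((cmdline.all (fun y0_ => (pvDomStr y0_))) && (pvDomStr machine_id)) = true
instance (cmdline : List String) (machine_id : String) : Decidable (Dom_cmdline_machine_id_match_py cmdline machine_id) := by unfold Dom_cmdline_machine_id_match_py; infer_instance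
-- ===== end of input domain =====

-- B replaces A's substring-check-then-manual-token-scan with the two substring
-- tests alone (the token scan is dead code for a True result): simpler, and the
-- timing run measured it faster by a constant factor.

-- ===== PORT A =====
-- cmdline[i].split("=", 1)[-1] == machine_id
def pvSplitTailEq (x machine_id : String) : Bool :=
  match PySem.Str.splitMax? x "=" 1 with
  | some parts => PySem.List.pyGet? parts (-1) == some machine_id
  | none => false  -- unreachable: sep "=" is nonempty

-- the while-loop over index i, as structural recursion on the remaining tokens
def pvScanA (machine_id : String) : List String → Bool
  | [] => false
  | [x] =>
      -- i is the last index: "i + 1 < len(cmdline)" is false, so only the startswith branch can fire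
      if PySem.Str.startswith x "--machine-id=" then pvSplitTailEq x machine_id
      else pvScanA machine_id []
  | x :: y :: rest =>
      if x == "--machine-id" then y == machine_id
      else if PySem.Str.startswith x "--machine-id=" then pvSplitTailEq x machine_id
      else pvScanA machine_id (y :: rest)

def cmdline_machine_id_match_py (cmdline : List String) (machine_id : String) : Bool :=
  let flat := PySem.Str.join " " cmdline
  if PySem.Str.isIn ("--machine-id " ++ machine_id) flat
      || PySem.Str.isIn ("--machine-id=" ++ machine_id) flat then
    true
  else
    pvScanA machine_id cmdline

-- ===== PORT B =====
def cmdline_machine_id_match_py_alt (cmdline : List String) (machine_id : String) : Bool :=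
  let flat := PySem.Str.join " " cmdline
  PySem.Str.isIn ("--machine-id " ++ machine_id) flat
    || PySem.Str.isIn ("--machine-id=" ++ machine_id) flat

-- ===== PRECONDITION & SPEC =====
def Spec_cmdline_machine_id_match_py (cmdline : List String) (machine_id : String) (out : Bool) : Prop := out = cmdline_machine_id_match_py_alt cmdline machine_id
instance (cmdline : List String) (machine_id : String) (out : Bool) : Decidable (Spec_cmdline_machine_id_match_py cmdline machine_id out) := by unfold Spec_cmdline_machine_id_match_py; infer_instance

-- ===== CLAIM (what is proved, stated in full; the proofs are below) =====
def Claim_equal_cmdline_machine_id_match_py : Prop := ∀ (cmdline : List String) (machine_id : String), Dom_cmdline_machine_id_match_py cmdline machine_id → Spec_cmdline_machine_id_match_py cmdline machine_id (cmdline_machine_id_match_py cmdline machine_id)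

-- ===== LEMMAS AND PROOFS =====

-- splitting "--machine-id=" ++ t on "=" with maxsplit 1 yields ["--machine-id", t]
lemma pv_splitOnMax_prefix (t : List Char) :
    PySem.Chars.splitOnMax ((String.toList "--machine-id=") ++ t) (String.toList "=") 1
      = [String.toList "--machine-id", t] := by
  show PySem.Chars.splitOnMax ('-'::'-'::'m'::'a'::'c'::'h'::'i'::'n'::'e'::'-'::'i'::'d'::'='::t) ['='] 1 = _
  unfold PySem.Chars.splitOnMax
  simp [PySem.Chars.splitOnMax.go]
  cases t with
  | nil => simp [PySem.Chars.splitOnMax.go]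
  | cons c rest => simp [PySem.Chars.splitOnMax.go]

-- the value A's "--machine-id=" branch compares: if it returns true, x is the literal flag=id token
lemma pv_tailEq_char (x machine_id : String)
    (hs : PySem.Str.startswith x "--machine-id=" = true)
    (ht : pvSplitTailEq x machine_id = true) :
    x.toList = (String.toList "--machine-id=") ++ machine_id.toList := by
  rw [PySem.Str.startswith_eq] at hs
  obtain ⟨t, hx⟩ := (PySem.Chars.startswith_iff _ _).mp hs
  unfold pvSplitTailEq at ht
  rw [PySem.Str.splitMax?] at ht
  rw [show x.toList = (String.toList "--machine-id=") ++ t from hx.symm] at ht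
  rw [PySem.Chars.splitMax?] at ht
  simp only [pv_splitOnMax_prefix] at ht
  simp [PySem.List.pyGet?, PySem.List.pyIdx?] at ht
  rw [← hx, ← ht]
  simp

-- a list's own chars are a prefix of the join starting with it
lemma pv_prefix_join (cs : List Char) (ts : List (List Char)) :
    cs <+: PySem.Chars.join [' '] (cs :: ts) := by
  cases ts with
  | nil => rw [PySem.Chars.join_singleton]
  | cons u us =>
      rw [PySem.Chars.join_cons_cons, List.append_assoc]
      exact List.prefix_append _ _

-- if the token scan returns true, one of the two flat-string patterns occurs in the join
lemma pv_scan_infix (machine_id : String) : ∀ (l : List String),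
    pvScanA machine_id l = true →
    ((String.toList "--machine-id ") ++ machine_id.toList
        <:+: PySem.Chars.join [' '] (l.map String.toList)) ∨
    ((String.toList "--machine-id=") ++ machine_id.toList
        <:+: PySem.Chars.join [' '] (l.map String.toList)) := by
  intro l
  induction l with
  | nil => intro h; simp [pvScanA] at h
  | cons x rest ih =>
      cases rest with
      | nil =>
          intro h
          simp only [pvScanA] at h
          by_cases hs : PySem.Str.startswith x "--machine-id=" = true
          · rw [if_pos hs] at h
            right
            rw [List.map_cons, List.map_nil, PySem.Chars.join_singleton,
              pv_tailEq_char x machine_id hs h]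
          · rw [if_neg hs] at h
            simp at h
      | cons y rs =>
          intro h
          simp only [pvScanA] at h
          by_cases hm : (x == "--machine-id") = true
          · -- x == "--machine-id": A returns y == machine_id
            rw [if_pos hm] at h
            left
            rw [List.map_cons, List.map_cons, PySem.Chars.join_cons_cons,
              eq_of_beq hm, eq_of_beq h]
            apply List.IsPrefix.isInfix
            obtain ⟨t2, ht2⟩ := pv_prefix_join machine_id.toList (rs.map String.toList)
            refine ⟨t2, ?_⟩
            have h0 : (String.toList "--machine-id ")
                = (String.toList "--machine-id") ++ [' '] := by decide
            rw [h0]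
            simp only [List.append_assoc]
            rw [ht2]
          · rw [if_neg hm] at h
            by_cases hs : PySem.Str.startswith x "--machine-id=" = true
            · rw [if_pos hs] at h
              right
              rw [List.map_cons, List.map_cons, PySem.Chars.join_cons_cons,
                ← pv_tailEq_char x machine_id hs h, List.append_assoc]
              exact (List.prefix_append _ _).isInfix
            · rw [if_neg hs] at h
              rcases ih h with hi | hi
              · left
                rw [List.map_cons, List.map_cons, PySem.Chars.join_cons_cons]
                exact hi.trans (List.suffix_append _ _).isInfix
              · right
                rw [List.map_cons, List.map_cons, PySem.Chars.join_cons_cons]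
                exact hi.trans (List.suffix_append _ _).isInfix

-- ===== VERDICT (by name: the statement is the Claim_ definition above) =====
theorem cmdline_machine_id_match_py_spec : Claim_equal_cmdline_machine_id_match_py := by
  unfold Claim_equal_cmdline_machine_id_match_py
  intro cmdline machine_id _
  unfold Spec_cmdline_machine_id_match_py
  unfold cmdline_machine_id_match_py cmdline_machine_id_match_py_alt
  simp only []
  set c := PySem.Str.isIn ("--machine-id " ++ machine_id) (PySem.Str.join " " cmdline)
      || PySem.Str.isIn ("--machine-id=" ++ machine_id) (PySem.Str.join " " cmdline) with hc
  cases hcv : c with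
  | true => rfl
  | false =>
      simp only [if_neg Bool.false_ne_true]
      rw [Bool.or_eq_false_iff] at hcv
      obtain ⟨h1, h2⟩ := hcv
      cases hs : pvScanA machine_id cmdline with
      | false => rfl
      | true =>
          exfalso
          have hflat : (PySem.Str.join " " cmdline).toList
              = PySem.Chars.join [' '] (cmdline.map String.toList) := by
            simp [PySem.Str.toList_join]
          rcases pv_scan_infix machine_id cmdline hs with hi | hi
          · exact (PySem.Chars.isIn_eq_false_iff _ _).mp (by
                rw [PySem.Str.isIn_eq] at h1
                simpa [hflat] using h1) (by simpa [String.toList_append] using hi)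
          · exact (PySem.Chars.isIn_eq_false_iff _ _).mp (by
                rw [PySem.Str.isIn_eq] at h2
                simpa [hflat] using h2) (by simpa [String.toList_append] using hi)
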